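-- pv_equiv track=rewrite | github.com/justinchiu/sentclass | sentclass/sentihood.py | get_all_opinions
-- ===== SOURCE A (Python) =====
-- LOCATIONS = ["location1", "location2",]
--
-- ASPECTS = ["price", "safety", "transit-location", "general",]
--
-- def unzip(xs):
--     return zip(*xs)
--
-- def get_all_opinions(opinions, text=None):
--     labels = {
--         (op["target_entity"].lower(), op["aspect"].lower()): op["sentiment"].lower()
--         for op in opinions
--     }
--     return list(unzip(
--         (
--             l,
--             a,
--             "none" if (l, a) not in labels else labels[(l,a)],
--         )
--         for l in LOCATIONS for a in ASPECTS
--         #for l in LOCATIONS for a in ALL_ASPECTS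
--     ))
-- ===== SOURCE B (Python) =====
-- LOCATIONS = ["location1", "location2",]
--
-- ASPECTS = ["price", "safety", "transit-location", "general",]
--
-- def get_all_opinions(opinions, text=None):
--     # No dict and no zip(*) transpose: for each fixed (location, aspect) cell,
--     # scan the opinions back-to-front for the most recent matching opinion
--     # (last write wins, like the dict comprehension), and build the three
--     # result columns directly as parallel accumulators.
--     def lookup(l, a):
--         for op in reversed(opinions):
--             if op["target_entity"].lower() == l and op["aspect"].lower() == a:
--                 return op["sentiment"].lower()
--         return "none"
--     locs, asps, sents = [], [], []
--     for l in LOCATIONS: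
--         for a in ASPECTS:
--             locs.append(l)
--             asps.append(a)
--             sents.append(lookup(l, a))
--     return [tuple(locs), tuple(asps), tuple(sents)]
-- ===== Notes on version B (the rewrite author's own statement) =====
-- stated objective: simpler
-- what changed: Drops both the dict comprehension and the unzip/zip(*) transpose: for each of the 8 fixed (location, aspect) cells B scans the opinions list back-to-front for the most recent matching opinion (last-write-wins, like the dict overwrite), and builds the three result columns directly as parallel accumulators.
import Mathlib
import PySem

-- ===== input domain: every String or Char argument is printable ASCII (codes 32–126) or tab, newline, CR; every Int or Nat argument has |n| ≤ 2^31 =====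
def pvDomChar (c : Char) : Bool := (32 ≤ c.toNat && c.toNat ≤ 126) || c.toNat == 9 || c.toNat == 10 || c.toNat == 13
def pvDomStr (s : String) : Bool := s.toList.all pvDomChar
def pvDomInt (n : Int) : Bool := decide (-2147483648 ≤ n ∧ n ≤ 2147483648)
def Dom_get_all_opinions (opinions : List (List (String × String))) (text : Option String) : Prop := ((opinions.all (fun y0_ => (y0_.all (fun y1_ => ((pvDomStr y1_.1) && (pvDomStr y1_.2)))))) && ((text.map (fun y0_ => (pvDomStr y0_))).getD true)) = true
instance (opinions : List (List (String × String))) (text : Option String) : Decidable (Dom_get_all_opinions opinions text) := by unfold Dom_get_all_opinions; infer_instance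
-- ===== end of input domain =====

-- B drops the dict and the zip(*) transpose: per fixed (location, aspect) cell it scans the
-- opinions back-to-front for the most recent match and builds the three columns directly (simpler).

-- ===== PORT A =====
def pvLOCATIONS : List String := ["location1", "location2"]
def pvASPECTS : List String := ["price", "safety", "transit-location", "general"]

-- op["k"] : first-match dict lookup; none = KeyError, excluded by Pre_ (getD "" is dead there)
def pvField (op : List (String × String)) (k : String) : String :=
  ((PySem.Dict.mk op).get? k).getD ""

-- the dict-comprehension key and value of one opinion
def pvKeyA (op : List (String × String)) : String × String :=
  (PySem.Str.lower (pvField op "target_entity"), PySem.Str.lower (pvField op "aspect"))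
def pvValA (op : List (String × String)) : String :=
  PySem.Str.lower (pvField op "sentiment")

def get_all_opinions (opinions : List (List (String × String))) (text : Option String) : List (List String) :=
  let labels : PySem.Dict (String × String) String :=
    opinions.foldl (fun d op => d.insert (pvKeyA op) (pvValA op)) PySem.Dict.empty
  let rows : List (String × String × String) :=
    pvLOCATIONS.flatMap (fun l => pvASPECTS.map (fun a =>
      (l, a, if labels.contains (l, a) = false then "none" else labels.getD (l, a) "none")))
  -- zip(*rows): rows is a list of triples, so the transpose is exactly the three projections
  [rows.map (·.1), rows.map (·.2.1), rows.map (·.2.2)]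

-- ===== PORT B =====
-- 'for op in reversed(opinions): if match: return sentiment; return "none"'
def pvLookup (revOps : List (List (String × String))) (l a : String) : String :=
  match revOps with
  | [] => "none"
  | op :: rest =>
      if PySem.Str.lower (pvField op "target_entity") == l
          && PySem.Str.lower (pvField op "aspect") == a then
        PySem.Str.lower (pvField op "sentiment")
      else pvLookup rest l a

def get_all_opinions_alt (opinions : List (List (String × String))) (text : Option String) : List (List String) :=
  let rev := opinions.reverse
  let acc : List String × List String × List String :=
    pvLOCATIONS.foldl (fun acc l =>
      pvASPECTS.foldl (fun acc a =>
        (acc.1 ++ [l], acc.2.1 ++ [a], acc.2.2 ++ [pvLookup rev l a])) acc) ([], [], [])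
  [acc.1, acc.2.1, acc.2.2]

-- ===== PRECONDITION & SPEC =====
-- Pre_ excludes exactly the inputs where the Python raises KeyError: an opinion dict
-- missing one of the keys "target_entity", "aspect", "sentiment".
def Pre_get_all_opinions (opinions : List (List (String × String))) (text : Option String) : Prop :=
  ∀ op ∈ opinions, "target_entity" ∈ op.map Prod.fst ∧ "aspect" ∈ op.map Prod.fst ∧ "sentiment" ∈ op.map Prod.fst
instance (opinions : List (List (String × String))) (text : Option String) : Decidable (Pre_get_all_opinions opinions text) := by unfold Pre_get_all_opinions; infer_instance

def pvWitness_get_all_opinions : (List (List (String × String))) × Option String :=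
  ([[("target_entity", "Location1"), ("aspect", "Price"), ("sentiment", "Positive")]], none)

def Spec_get_all_opinions (opinions : List (List (String × String))) (text : Option String) (out : List (List String)) : Prop := out = get_all_opinions_alt opinions text
instance (opinions : List (List (String × String))) (text : Option String) (out : List (List String)) : Decidable (Spec_get_all_opinions opinions text out) := by unfold Spec_get_all_opinions; infer_instance

-- ===== CLAIM (what is proved, stated in full; the proofs are below) =====
def Claim_equal_get_all_opinions : Prop := ∀ (opinions : List (List (String × String))) (text : Option String), Dom_get_all_opinions opinions text → Pre_get_all_opinions opinions text → Spec_get_all_opinions opinions text (get_all_opinions opinions text)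

-- ===== LEMMAS AND PROOFS =====

-- the dict built by the fold looks up to the last matching opinion = first match in the reversed list
theorem get?_foldl_insert_key (ops : List (List (String × String)))
    (d : PySem.Dict (String × String) String) (k : String × String) :
    (ops.foldl (fun d op => d.insert (pvKeyA op) (pvValA op)) d).get? k
      = ((ops.reverse.find? (fun op => pvKeyA op == k)).map pvValA).or (d.get? k) := by
  induction ops generalizing d with
  | nil => simp
  | cons op rest ih =>
      simp only [List.foldl_cons, List.reverse_cons, List.find?_append, ih]
      cases hf : rest.reverse.find? (fun op => pvKeyA op == k) with
      | some v => simp [Option.or]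
      | none =>
          by_cases hk : pvKeyA op = k
          · simp [hk, Option.or, PySem.Dict.get?_insert_self]
          · simp [hk, Option.or, PySem.Dict.get?_insert_of_ne _ _ (Ne.symm hk)]

theorem pvLookup_eq_find (revOps : List (List (String × String))) (l a : String) :
    pvLookup revOps l a
      = ((revOps.find? (fun op => pvKeyA op == (l, a))).map pvValA).getD "none" := by
  induction revOps with
  | nil => simp [pvLookup]
  | cons op rest ih =>
      by_cases h : pvKeyA op = (l, a)
      · have h1 : PySem.Str.lower (pvField op "target_entity") = l := congrArg Prod.fst h
        have h2 : PySem.Str.lower (pvField op "aspect") = a := congrArg Prod.snd h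
        simp [pvLookup, h, h1, h2, pvValA]
      · have : ¬ (PySem.Str.lower (pvField op "target_entity") = l
            ∧ PySem.Str.lower (pvField op "aspect") = a) := by
          intro ⟨h1, h2⟩; exact h (by simp [pvKeyA, h1, h2])
        rw [pvLookup]
        rw [List.find?_cons_of_neg (by simpa [pvKeyA, Prod.ext_iff, -not_and] using this)]
        rw [ih]
        split
        · next hc =>
            simp only [Bool.and_eq_true, beq_iff_eq] at hc
            exact absurd hc this
        · rfl

-- one cell of A equals one cell of B
theorem cell_eq (opinions : List (List (String × String))) (l a : String) :
    (let labels := opinions.foldl (fun d op => d.insert (pvKeyA op) (pvValA op)) PySem.Dict.empty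
     if labels.contains (l, a) = false then "none" else labels.getD (l, a) "none")
      = pvLookup opinions.reverse l a := by
  simp only [pvLookup_eq_find, PySem.Dict.getD_eq_get?_getD, PySem.Dict.contains_eq_isSome_get?,
    get?_foldl_insert_key, PySem.Dict.get?_empty, Option.or_none]
  cases (opinions.reverse.find? (fun op => pvKeyA op == (l, a))).map pvValA <;> simp

-- ===== VERDICT (by name: the statement is the Claim_ definition above) =====
theorem get_all_opinions_spec : Claim_equal_get_all_opinions := by
  intro opinions text _ _
  show get_all_opinions opinions text = get_all_opinions_alt opinions text
  have hc := fun l a => cell_eq opinions l a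
  simp only at hc
  simp only [get_all_opinions, get_all_opinions_alt, pvLOCATIONS, pvASPECTS,
    List.flatMap_cons, List.flatMap_nil, List.map_cons, List.map_nil, List.append_nil,
    List.foldl_cons, List.foldl_nil, List.cons_append, List.nil_append, hc]
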